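-- pv_equiv track=rewrite | github.com/DanielOrosPNU/lab4 | src/example_package_daniel.oros/lab4.py | rev_str
-- ===== SOURCE A (Python) =====
-- def rev_str(s):
--     if isinstance(s, str) and s.strip():
--         result = ''
--         for word in str(s).split():
--             x = list(filter(str.isalpha, word[::-1]))
--             for index, char in enumerate(word):
--                 if not char.isalpha():
--                     x.insert(index, char)
--             result += ''.join(x) + ' '
--         return result.strip()
--     elif isinstance(s, str):
--         return ''
--     else:
--         raise TypeError('Input must be a string')
-- ===== SOURCE B (Python) =====
-- def rev_str(s):
--     if not isinstance(s, str):
--         raise TypeError('Input must be a string')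
--     words = []
--     for word in s.split():
--         ra = [c for c in word if c.isalpha()]
--         out = []
--         for c in word:
--             out.append(ra.pop() if c.isalpha() else c)
--         words.append(''.join(out))
--     return ' '.join(words)
-- ===== Notes on version B (the rewrite author's own statement) =====
-- stated objective: alternative
-- what changed: Per word, A filters a reversed copy and re-inserts every non-alpha char by list.insert, accumulating each word plus a trailing space and stripping at the end; B makes one forward pass popping precomputed alpha chars off the end of a list and joins the words with a single space.
import Mathlib
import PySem

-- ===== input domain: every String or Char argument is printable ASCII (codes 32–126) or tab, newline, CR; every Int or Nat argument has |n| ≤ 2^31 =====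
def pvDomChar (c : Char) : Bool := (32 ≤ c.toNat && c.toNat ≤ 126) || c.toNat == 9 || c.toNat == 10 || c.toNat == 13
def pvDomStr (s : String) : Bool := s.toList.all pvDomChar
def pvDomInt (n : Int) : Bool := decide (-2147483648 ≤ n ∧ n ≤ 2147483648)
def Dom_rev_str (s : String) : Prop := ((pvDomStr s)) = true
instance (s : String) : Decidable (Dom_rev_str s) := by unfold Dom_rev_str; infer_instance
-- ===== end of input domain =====

-- B replaces A's per-word rebuild (filter a reversed copy, then list.insert at every
-- non-alpha index) by one forward pass popping the word's alpha chars off the end of a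
-- precomputed list, and A's trailing-space accumulation + strip by ' '.join.

-- ===== PORT A =====
-- x = list(filter(str.isalpha, word[::-1]))   (word[::-1] is List.reverse: PySem.List.slice?_none_none_neg_one)
-- for index, char in enumerate(word): if not char.isalpha(): x.insert(index, char)
def revWordA (w : List Char) : List Char :=
  (PySem.List.enumerate w 0).foldl
    (fun x p => if !(PySem.Chars.isalpha p.2) then PySem.List.insert x p.1 p.2 else x)
    (List.filter PySem.Chars.isalpha w.reverse)

-- isinstance(s, str) is always true for s : String, so the TypeError branch is unreachable;
-- result accumulates ''.join(x) + ' ' per word of s.split(), then is stripped.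
def rev_str (s : String) : String :=
  if PySem.Chars.strip s.toList ≠ [] then
    String.ofList (PySem.Chars.strip
      ((PySem.Chars.split₀ s.toList).foldl (fun result w => result ++ revWordA w ++ [' ']) []))
  else ""

-- ===== PORT B =====
-- ra = [c for c in word if c.isalpha()]; out.append(ra.pop() if c.isalpha() else c)
-- (ra.pop() never sees an empty list; getLastD's default is a totality guard only)
def revWordB (w : List Char) : List Char :=
  (w.foldl
    (fun (st : List Char × List Char) c =>
      if PySem.Chars.isalpha c then (st.1 ++ [st.2.getLastD c], st.2.dropLast)
      else (st.1 ++ [c], st.2))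
    ([], w.filter PySem.Chars.isalpha)).1

-- words.append(''.join(out)); return ' '.join(words)
def rev_str_alt (s : String) : String :=
  String.ofList (PySem.Chars.join [' ']
    ((PySem.Chars.split₀ s.toList).foldl (fun ws w => ws ++ [revWordB w]) []))

-- ===== PRECONDITION & SPEC =====
def Spec_rev_str (s : String) (out : String) : Prop := out = rev_str_alt s
instance (s : String) (out : String) : Decidable (Spec_rev_str s out) := by unfold Spec_rev_str; infer_instance

-- ===== CLAIM (what is proved, stated in full; the proofs are below) =====
def Claim_equal_rev_str : Prop := ∀ (s : String), Dom_rev_str s → Spec_rev_str s (rev_str s)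

-- ===== LEMMAS AND PROOFS =====

def mspec : List Char → List Char → List Char
  | [], _ => []
  | c :: cs, r => if PySem.Chars.isalpha c then r.headD c :: mspec cs r.tail
                  else c :: mspec cs r

theorem getLastD_eq_headD_reverse (r : List Char) (c : Char) : r.getLastD c = r.reverse.headD c := by
  cases h : r.reverse with
  | nil => simp [List.reverse_eq_nil_iff.1 h]
  | cons a t =>
    have : r = (a :: t).reverse := by rw [← h]; simp
    subst this; simp

theorem revWordB_eq_mspec_aux (w : List Char) : ∀ (out r : List Char),
    w.foldl
      (fun (st : List Char × List Char) c =>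
        if PySem.Chars.isalpha c then (st.1 ++ [st.2.getLastD c], st.2.dropLast)
        else (st.1 ++ [c], st.2))
      (out, r)
    = (out ++ mspec w r.reverse, (r.reverse.drop (w.countP PySem.Chars.isalpha)).reverse) := by
  induction w with
  | nil => intro out r; simp [mspec]
  | cons c cs ih =>
    intro out r
    rw [List.foldl_cons]
    by_cases h : PySem.Chars.isalpha c
    · simp only [h, if_true, ih]
      rw [getLastD_eq_headD_reverse, ← List.tail_reverse]
      simp only [mspec, h, if_true, List.countP_cons, List.append_assoc, List.singleton_append]
      rw [List.drop_tail]
    · simp only [h, ih]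
      simp [mspec, h]

theorem revWordB_eq_mspec (w : List Char) :
    revWordB w = mspec w (w.reverse.filter PySem.Chars.isalpha) := by
  unfold revWordB
  rw [revWordB_eq_mspec_aux]
  simp [List.filter_reverse]

theorem revWordA_aux (w : List Char) : ∀ (out r : List Char),
    w.countP PySem.Chars.isalpha ≤ r.length →
    (PySem.List.enumerate w (out.length : Int)).foldl
      (fun x p => if !(PySem.Chars.isalpha p.2) then PySem.List.insert x p.1 p.2 else x)
      (out ++ r)
    = out ++ mspec w r ++ r.drop (w.countP PySem.Chars.isalpha) := by
  induction w with
  | nil => intro out r _; simp [mspec, PySem.List.enumerate]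
  | cons c cs ih =>
    intro out r hlen
    rw [PySem.List.enumerate_cons, List.foldl_cons]
    simp only [List.countP_cons] at hlen ⊢
    by_cases h : PySem.Chars.isalpha c
    · obtain ⟨a, t, rfl⟩ : ∃ a t, r = a :: t := by
        cases r with
        | nil => simp [h] at hlen
        | cons a t => exact ⟨a, t, rfl⟩
      have h1 : cs.countP PySem.Chars.isalpha ≤ t.length := by
        simp [h] at hlen; omega
      simp only [h, Bool.not_true, Bool.false_eq_true, if_false]
      have e2 : (out.length : Int) + 1 = (((out ++ [a]).length : Nat) : Int) := by simp
      have e3 : out ++ a :: t = (out ++ [a]) ++ t := by simp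
      rw [e2, e3, ih (out ++ [a]) t h1]
      simp [mspec, h]
    · simp only [h, Bool.not_false, if_true]
      have hins : PySem.List.insert (out ++ r) ((out.length : Nat) : Int) c = (out ++ [c]) ++ r := by
        rw [PySem.List.insert_natCast (out ++ r) out.length c (by simp)]
        simp
      rw [hins]
      have e2 : (out.length : Int) + 1 = (((out ++ [c]).length : Nat) : Int) := by simp
      rw [e2, ih (out ++ [c]) r (by simpa [h] using hlen)]
      simp [mspec, h]

theorem revWordA_eq_mspec (w : List Char) :
    revWordA w = mspec w (w.reverse.filter PySem.Chars.isalpha) := by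
  unfold revWordA
  have hlen : w.countP PySem.Chars.isalpha ≤ (w.reverse.filter PySem.Chars.isalpha).length := by
    simp [← List.countP_eq_length_filter]
  have := revWordA_aux w [] (w.reverse.filter PySem.Chars.isalpha) hlen
  simp only [List.length_nil, Nat.cast_zero, List.nil_append] at this
  rw [this]
  have hl2 : (w.reverse.filter PySem.Chars.isalpha).length = w.countP PySem.Chars.isalpha := by
    simp [← List.countP_eq_length_filter]
  rw [List.drop_eq_nil_of_le (le_of_eq hl2), List.append_nil]

def Q (w : List Char) : Prop := w ≠ [] ∧ ∀ c ∈ w, PySem.Chars.isspace c = false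

theorem mspec_length (w : List Char) : ∀ r, (mspec w r).length = w.length := by
  induction w with
  | nil => intro r; simp [mspec]
  | cons c cs ih => intro r; by_cases h : PySem.Chars.isalpha c <;> simp [mspec, h, ih]

theorem mspec_mem (w : List Char) : ∀ r c, c ∈ mspec w r → c ∈ w ∨ c ∈ r := by
  induction w with
  | nil => intro r c h; simp [mspec] at h
  | cons a cs ih =>
    intro r c h
    by_cases ha : PySem.Chars.isalpha a <;> simp only [mspec, ha, if_true] at h
    · rcases List.mem_cons.1 h with h1 | h2
      · cases r with
        | nil => subst h1; simp
        | cons x t => subst h1; simp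
      · rcases ih r.tail c h2 with h3 | h3
        · exact Or.inl (List.mem_cons_of_mem _ h3)
        · exact Or.inr (List.mem_of_mem_tail h3)
    · rcases List.mem_cons.1 h with h1 | h2
      · exact Or.inl (h1 ▸ List.mem_cons_self)
      · rcases ih r c h2 with h3 | h3
        · exact Or.inl (List.mem_cons_of_mem _ h3)
        · exact Or.inr h3

theorem split₀_go_prop : ∀ (s cur acc : _),
    (∀ w ∈ acc, Q w) → (∀ c ∈ cur, PySem.Chars.isspace c = false) →
    ∀ w ∈ PySem.Chars.split₀.go s cur acc, Q w := by
  intro s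
  induction s with
  | nil =>
    intro cur acc hacc hcur w hw
    by_cases hc : cur.isEmpty <;> simp [PySem.Chars.split₀.go, hc] at hw
    · exact hacc w hw
    · rcases hw with h | h
      · exact hacc w h
      · subst h
        refine ⟨by simpa [List.isEmpty_iff] using hc, ?_⟩
        intro c hcmem; exact hcur c (List.mem_reverse.1 hcmem)
  | cons a rest ih =>
    intro cur acc hacc hcur w hw
    by_cases hs : PySem.Chars.isspace a
    · by_cases hc : cur.isEmpty
      · simp only [PySem.Chars.split₀.go, hs, hc, if_true] at hw
        exact ih [] acc hacc (by simp) w hw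
      · simp only [PySem.Chars.split₀.go, hs, hc, if_true] at hw
        refine ih [] (cur.reverse :: acc) ?_ (by simp) w hw
        intro v hv
        rcases List.mem_cons.1 hv with h | h
        · subst h
          exact ⟨by simpa [List.isEmpty_iff] using hc, fun c hcm => hcur c (List.mem_reverse.1 hcm)⟩
        · exact hacc v h
    · simp only [PySem.Chars.split₀.go, hs] at hw
      refine ih (a :: cur) acc hacc ?_ w hw
      intro c hcm
      rcases List.mem_cons.1 hcm with h | h
      · subst h; simpa using hs
      · exact hcur c h

theorem split₀_prop (s : List Char) : ∀ w ∈ PySem.Chars.split₀ s, Q w := by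
  intro w hw
  exact split₀_go_prop s [] [] (by simp) (by simp) w hw

theorem split₀_all_space (s : List Char) (h : ∀ c ∈ s, PySem.Chars.isspace c = true) :
    PySem.Chars.split₀ s = [] := by
  show PySem.Chars.split₀.go s [] [] = []
  induction s with
  | nil => simp [PySem.Chars.split₀.go]
  | cons a rest ih =>
    have ha := h a List.mem_cons_self
    simp only [PySem.Chars.split₀.go, ha, if_true, List.isEmpty_nil]
    exact ih (fun c hc => h c (List.mem_cons_of_mem _ hc))

theorem strip_nil_all_space (s : List Char) (h : PySem.Chars.strip s = []) :
    ∀ c ∈ s, PySem.Chars.isspace c = true := by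
  intro c hc
  unfold PySem.Chars.strip PySem.Chars.rstrip PySem.Chars.lstrip at h
  have h2 : ∀ c ∈ (List.dropWhile PySem.Chars.isspace s).reverse, PySem.Chars.isspace c = true := by
    have := List.reverse_eq_nil_iff.1 h
    exact fun c hc => List.dropWhile_eq_nil_iff.1 this c hc
  have hc2 : c ∈ List.takeWhile PySem.Chars.isspace s ++ List.dropWhile PySem.Chars.isspace s := by
    rw [List.takeWhile_append_dropWhile]; exact hc
  rcases List.mem_append.1 hc2 with hm | hm
  · exact List.mem_takeWhile_imp hm
  · exact h2 c (List.mem_reverse.2 hm)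

theorem flatMap_space (L : List (List Char)) (h : L ≠ []) :
    L.flatMap (fun w => w ++ [' ']) = PySem.Chars.join [' '] L ++ [' '] := by
  induction L with
  | nil => exact absurd rfl h
  | cons w rest ih =>
    cases rest with
    | nil => simp [PySem.Chars.join_singleton]
    | cons x l =>
      rw [List.flatMap_cons, ih (by simp), PySem.Chars.join_cons_cons]
      simp

theorem join_ends (L : List (List Char)) (h : L ≠ []) (hQ : ∀ w ∈ L, Q w) :
    PySem.Chars.join [' '] L ≠ [] ∧
    PySem.Chars.isspace ((PySem.Chars.join [' '] L).headD ' ') = false ∧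
    PySem.Chars.isspace ((PySem.Chars.join [' '] L).getLastD ' ') = false := by
  induction L with
  | nil => exact absurd rfl h
  | cons w rest ih =>
    cases rest with
    | nil =>
      rw [PySem.Chars.join_singleton]
      obtain ⟨hne, hsp⟩ := hQ w List.mem_cons_self
      obtain ⟨c, w', rfl⟩ := List.exists_cons_of_ne_nil hne
      refine ⟨by simp, hsp c List.mem_cons_self, ?_⟩
      have : (c :: w').getLastD ' ' ∈ c :: w' := by
        rw [List.getLastD_eq_getLast?, List.getLast?_eq_some_getLast (by simp)]
        simp [List.getLast_mem]
      exact hsp _ this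
    | cons x l =>
      rw [PySem.Chars.join_cons_cons]
      obtain ⟨hne, hsp⟩ := hQ w List.mem_cons_self
      obtain ⟨c, w', rfl⟩ := List.exists_cons_of_ne_nil hne
      obtain ⟨jne, _, jlast⟩ := ih (by simp) (fun v hv => hQ v (List.mem_cons_of_mem _ hv))
      refine ⟨by simp, ?_, ?_⟩
      · simpa using hsp c List.mem_cons_self
      · rw [List.getLastD_eq_getLast?, List.getLast?_append_of_ne_nil _ jne,
            ← List.getLastD_eq_getLast?]
        exact jlast

theorem strip_join_space (L : List (List Char)) (h : L ≠ []) (hQ : ∀ w ∈ L, Q w) :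
    PySem.Chars.strip (PySem.Chars.join [' '] L ++ [' ']) = PySem.Chars.join [' '] L := by
  obtain ⟨jne, jhead, jlast⟩ := join_ends L h hQ
  set J := PySem.Chars.join [' '] L with hJ
  obtain ⟨c, m, hcm⟩ := List.exists_cons_of_ne_nil jne
  unfold PySem.Chars.strip PySem.Chars.lstrip PySem.Chars.rstrip
  have hlstrip : List.dropWhile PySem.Chars.isspace (J ++ [' ']) = J ++ [' '] := by
    rw [hcm]
    have : PySem.Chars.isspace c = false := by simpa [hcm] using jhead
    simp [this]
  rw [hlstrip]
  have hrev : (J ++ [' ']).reverse = ' ' :: J.reverse := by simp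
  rw [hrev]
  have hsp : PySem.Chars.isspace ' ' = true := by decide
  rw [List.dropWhile_cons_of_pos hsp]
  cases hjr : J.reverse with
  | nil => exact absurd (by simpa using hjr) jne
  | cons d t =>
    have hgl : J.getLastD ' ' = d := by
      rw [getLastD_eq_headD_reverse, hjr]; rfl
    have hd : PySem.Chars.isspace d = false := by rw [← hgl]; exact jlast
    rw [List.dropWhile_cons_of_neg (by simp [hd]), ← hjr]
    simp

theorem word_eq (w : List Char) : revWordA w = revWordB w := by
  rw [revWordA_eq_mspec, revWordB_eq_mspec]

theorem wordQ (w : List Char) (hw : Q w) : Q (revWordA w) := by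
  rw [revWordA_eq_mspec]
  obtain ⟨hne, hsp⟩ := hw
  constructor
  · intro hnil
    have := mspec_length w (w.reverse.filter PySem.Chars.isalpha)
    rw [hnil] at this
    exact hne (List.length_eq_zero_iff.1 this.symm)
  · intro c hc
    rcases mspec_mem w _ c hc with h | h
    · exact hsp c h
    · exact hsp c (List.mem_reverse.1 (List.mem_of_mem_filter h))

theorem main_eq (s : String) : rev_str s = rev_str_alt s := by
  unfold rev_str rev_str_alt
  rw [PySem.List.foldl_append_singleton_eq_map, List.nil_append]
  by_cases hstrip : PySem.Chars.strip s.toList = []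
  · rw [if_neg (by simpa using hstrip)]
    rw [split₀_all_space s.toList (strip_nil_all_space _ hstrip)]
    rfl
  · rw [if_pos hstrip]
    have hfold : (PySem.Chars.split₀ s.toList).foldl
        (fun result w => result ++ revWordA w ++ [' ']) []
        = ((PySem.Chars.split₀ s.toList).map revWordA).flatMap (fun v => v ++ [' ']) := by
      have h1 : (PySem.Chars.split₀ s.toList).foldl
          (fun result w => result ++ revWordA w ++ [' ']) []
          = (PySem.Chars.split₀ s.toList).foldl
          (fun result w => result ++ (revWordA w ++ [' '])) [] := by
        exact PySem.List.foldl_congr_mem _ _ _ _ (fun acc x _ => by simp)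
      rw [h1, PySem.List.foldl_append_eq_flatMap, List.nil_append, List.flatMap_map]
    rw [hfold]
    cases hws : PySem.Chars.split₀ s.toList with
    | nil => rfl
    | cons w l =>
      have hQ : ∀ v ∈ (w :: l).map revWordA, Q v := by
        intro v hv
        obtain ⟨u, hu, rfl⟩ := List.mem_map.1 hv
        exact wordQ u (split₀_prop s.toList u (hws ▸ hu))
      rw [flatMap_space _ (by simp), strip_join_space _ (by simp) hQ]
      have : (w :: l).map revWordA = (w :: l).map revWordB :=
        List.map_congr_left (fun u _ => word_eq u)
      rw [this]

-- ===== VERDICT (by name: the statement is the Claim_ definition above) =====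
theorem rev_str_spec : Claim_equal_rev_str := by
  intro s _
  exact main_eq s
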